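-- pv_equiv track=rewrite | github.com/elliot-chung/cube-solver-backend | rubikscube.py | build_cube_state
-- ===== SOURCE A (Python) =====
-- from typing import List, TypedDict
--
-- CubeState = TypedDict('CubeState', {'corner_position': list[int],
--                                     'corner_orientation': list[int],
--                                     'edge_position': list[int],
--                                     'edge_orientation': list[int]})
--
-- def build_cube_state(scramble: List[str]) -> CubeState:
--     position = [0] * 20
--     orientation = [0] * 20
--
--
--     for i, cubie in enumerate(scramble):
--         while cubie not in _goal:
--             cubie = cubie[1:] + cubie[0]
--             orientation[i] += 1
--             if orientation[i] == 3:
--                 raise Exception("Invalid scramble")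
--         position[i] = _goal.index(cubie) if i < 12 else _goal.index(cubie) - 12
--
--     return CubeState({'corner_position': position[12:],
--                       'corner_orientation': orientation[12:],
--                       'edge_position': position[:12],
--                       'edge_orientation': orientation[:12],
--                       })
--
-- _goal = [ "UF", "UR", "UB", "UL",
--              "DF", "DR", "DB", "DL",
--              "FR", "FL", "BR", "BL",
-- 		     "UFR", "URB", "UBL", "ULF",
--              "DRF", "DFL", "DLB", "DBR" ]
-- ===== SOURCE B (Python) =====
-- from typing import List, TypedDict
--
-- CubeState = TypedDict('CubeState', {'corner_position': list[int],
--                                     'corner_orientation': list[int],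
--                                     'edge_position': list[int],
--                                     'edge_orientation': list[int]})
--
-- _goal = [ "UF", "UR", "UB", "UL",
--           "DF", "DR", "DB", "DL",
--           "FR", "FL", "BR", "BL",
--           "UFR", "URB", "UBL", "ULF",
--           "DRF", "DFL", "DLB", "DBR" ]
--
-- # For each goal string g and each k in 0..2, the input that needs k forward
-- # (left) rotations to reach g is the right-rotation of g by k; keep smallest k.
-- _table = {}
-- for _idx, _g in enumerate(_goal):
--     for _k in range(3):
--         _key = _g[-_k:] + _g[:-_k] if _k else _g
--         if _key not in _table:
--             _table[_key] = (_idx, _k)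
--
-- def build_cube_state(scramble: List[str]) -> CubeState:
--     position = [0] * 20
--     orientation = [0] * 20
--     for i, cubie in enumerate(scramble):
--         if cubie not in _table:
--             raise Exception("Invalid scramble")
--         idx, k = _table[cubie]
--         orientation[i] = k
--         position[i] = idx if i < 12 else idx - 12
--     return CubeState({'corner_position': position[12:],
--                       'corner_orientation': orientation[12:],
--                       'edge_position': position[:12],
--                       'edge_orientation': orientation[:12],
--                       })
-- ===== Notes on version B (the rewrite author's own statement) =====
-- stated objective: simpler
-- what changed: Replaces the per-cubie while-rotation loop and linear _goal.index scan with a module-level table built once, mapping every rotated form of each goal cubie to its (index, rotation-count) pair, so the main loop is a single dict lookup per cubie.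
import Mathlib
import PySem

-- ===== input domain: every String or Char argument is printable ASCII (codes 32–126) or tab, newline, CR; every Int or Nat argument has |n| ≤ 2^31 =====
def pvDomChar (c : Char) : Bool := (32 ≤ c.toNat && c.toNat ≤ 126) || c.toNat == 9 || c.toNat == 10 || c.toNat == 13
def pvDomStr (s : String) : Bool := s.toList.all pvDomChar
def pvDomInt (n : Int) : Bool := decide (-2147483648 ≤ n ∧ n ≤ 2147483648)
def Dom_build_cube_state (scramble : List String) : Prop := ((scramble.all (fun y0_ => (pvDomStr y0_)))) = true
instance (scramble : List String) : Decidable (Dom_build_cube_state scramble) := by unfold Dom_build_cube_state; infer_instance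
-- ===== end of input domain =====

-- B replaces A's per-cubie while-rotation + linear _goal.index scan by one precomputed
-- rotation→(index, count) table lookup per cubie; equivalence of the returned value is proved on Pre_.

-- ===== PORT A =====
def pvGoalA : List String := ["UF", "UR", "UB", "UL",
                              "DF", "DR", "DB", "DL",
                              "FR", "FL", "BR", "BL",
                              "UFR", "URB", "UBL", "ULF",
                              "DRF", "DFL", "DLB", "DBR"]

-- cubie[1:] + cubie[0]  (exact for nonempty cubies; empty cubies raise in Python and are outside Pre_)
def pvRotA (c : String) : String := String.ofList (c.toList.drop 1 ++ c.toList.take 1)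

-- the 'while cubie not in _goal' loop; fuel 3 models the 'orientation[i] == 3: raise' bound
-- (fuel exhausted = the Exception path, outside Pre_)
def pvWhileA : Nat → String → Int → (String × Int)
  | 0, c, o => (c, o)
  | fuel + 1, c, o => if pvGoalA.contains c then (c, o) else pvWhileA fuel (pvRotA c) (o + 1)

-- _goal.index(cubie); under Pre_ the cubie's resolved form is in _goal, so getD 0 is exact
def pvIdxA (c : String) : Int := ((PySem.List.index? pvGoalA c).getD 0 : Nat)

def pvLoopA : List Int × List Int → Nat → List String → List Int × List Int
  | st, _, [] => st
  | (pos, ori), i, c :: rest =>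
      let r := pvWhileA 3 c 0
      pvLoopA (pos.set i (if i < 12 then pvIdxA r.1 else pvIdxA r.1 - 12), ori.set i r.2) (i + 1) rest

def build_cube_state (scramble : List String) : List (String × List Int) :=
  let st := pvLoopA (List.replicate 20 0, List.replicate 20 0) 0 scramble
  [("corner_position", st.1.drop 12), ("corner_orientation", st.2.drop 12),
   ("edge_position", st.1.take 12), ("edge_orientation", st.2.take 12)]

-- ===== PORT B =====
def pvGoalB : List String := ["UF", "UR", "UB", "UL",
                              "DF", "DR", "DB", "DL",
                              "FR", "FL", "BR", "BL",
                              "UFR", "URB", "UBL", "ULF",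
                              "DRF", "DFL", "DLB", "DBR"]

-- g[-k:] + g[:-k] if k else g   (right rotation by k)
def pvRRotB (k : Nat) (g : String) : String :=
  if k = 0 then g
  else String.ofList (g.toList.drop (g.toList.length - k) ++ g.toList.take (g.toList.length - k))

-- the module-level _table built by the two nested for-loops of Source B
def pvTableB : PySem.Dict String (Int × Int) :=
  (PySem.List.enumerate pvGoalB).foldl
    (fun d ig =>
      [0, 1, 2].foldl
        (fun d k =>
          let key := pvRRotB k ig.2
          if d.contains key then d else d.insert key (ig.1, (k : Int)))
        d)
    PySem.Dict.empty

def pvLoopB (table : PySem.Dict String (Int × Int)) : List Int × List Int → Nat → List String → List Int × List Int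
  | st, _, [] => st
  | (pos, ori), i, c :: rest =>
      match table.get? c with
      | none => (pos, ori)   -- raise Exception("Invalid scramble"): outside Pre_
      | some (idx, k) =>
          pvLoopB table (pos.set i (if i < 12 then idx else idx - 12), ori.set i k) (i + 1) rest

def build_cube_state_alt (scramble : List String) : List (String × List Int) :=
  let st := pvLoopB pvTableB (List.replicate 20 0, List.replicate 20 0) 0 scramble
  [("corner_position", st.1.drop 12), ("corner_orientation", st.2.drop 12),
   ("edge_position", st.1.take 12), ("edge_orientation", st.2.take 12)]

-- ===== PRECONDITION & SPEC =====
-- the 48 strings on which A's rotation search succeeds: every rotation (by 0,1,2) of a goal cubie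
def pvValidCubies : List String :=
  ["UF", "FU", "UR", "RU", "UB", "BU", "UL", "LU", "DF", "FD", "DR", "RD",
   "DB", "BD", "DL", "LD", "FR", "RF", "FL", "LF", "BR", "RB", "BL", "LB",
   "UFR", "RUF", "FRU", "URB", "BUR", "RBU", "UBL", "LUB", "BLU", "ULF", "FUL", "LFU",
   "DRF", "FDR", "RFD", "DFL", "LDF", "FLD", "DLB", "BDL", "LBD", "DBR", "RDB", "BRD"]

-- Pre_: exactly the inputs where Python A returns: at most 20 cubies (index 20 would raise
-- IndexError) and every cubie is a rotation of a goal cubie (otherwise A raises).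
def Pre_build_cube_state (scramble : List String) : Prop :=
  scramble.length ≤ 20 ∧ ∀ c ∈ scramble, c ∈ pvValidCubies

instance (scramble : List String) : Decidable (Pre_build_cube_state scramble) := by
  unfold Pre_build_cube_state; infer_instance

def pvWitness_build_cube_state : List String :=
  ["FU", "UR", "LB", "RUF", "DBR"]

def Spec_build_cube_state (scramble : List String) (out : List (String × List Int)) : Prop :=
  out = build_cube_state_alt scramble
instance (scramble : List String) (out : List (String × List Int)) : Decidable (Spec_build_cube_state scramble out) := by
  unfold Spec_build_cube_state; infer_instance

-- ===== CLAIM (what is proved, stated in full; the proofs are below) =====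
def Claim_equal_build_cube_state : Prop := ∀ (scramble : List String), Dom_build_cube_state scramble → Pre_build_cube_state scramble → Spec_build_cube_state scramble (build_cube_state scramble)

-- ===== LEMMAS AND PROOFS =====

-- per-cubie agreement on the 48 valid cubies, checked by the kernel
set_option maxRecDepth 4096 in
theorem pvCubie_eq : ∀ c ∈ pvValidCubies,
    pvTableB.get? c = some (pvIdxA (pvWhileA 3 c 0).1, (pvWhileA 3 c 0).2) := by
  decide

theorem pvLoop_eq (l : List String) (h : ∀ c ∈ l, c ∈ pvValidCubies) :
    ∀ (st : List Int × List Int) (i : Nat), pvLoopA st i l = pvLoopB pvTableB st i l := by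
  induction l with
  | nil => intro st i; rw [pvLoopA.eq_1, pvLoopB.eq_1]
  | cons c rest ih =>
      intro st i
      obtain ⟨pos, ori⟩ := st
      have hc := pvCubie_eq c (h c (List.mem_cons_self ..))
      rw [pvLoopA.eq_2, pvLoopB.eq_2, hc]
      exact ih (fun x hx => h x (List.mem_cons_of_mem _ hx)) _ _

theorem pvMain (scramble : List String) (h : ∀ c ∈ scramble, c ∈ pvValidCubies) :
    build_cube_state scramble = build_cube_state_alt scramble := by
  simp only [build_cube_state, build_cube_state_alt, pvLoop_eq scramble h]

-- ===== VERDICT (by name: the statement is the Claim_ definition above) =====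
theorem build_cube_state_spec : Claim_equal_build_cube_state := by
  intro scramble _ hpre
  exact pvMain scramble hpre.2
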